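-- pv_equiv track=rewrite | github.com/lyharthur/Sequential-Pattern-Mining | prefixspan_newC.py | make_sequence
-- ===== SOURCE A (Python) =====
-- from collections import defaultdict
--
-- def make_sequence(db):
--     sequence_done = []
--     sequence = []
--     itemset = []
--     items = defaultdict(lambda: 0)
--     transactions_done = []
--     i = 0
--     for id_list in db:
--         try:
--             if db[i][0] == db[i+1][0]:
--                 if db[i][1] == db[i+1][1]: # same set
--                     if not itemset :
--                         itemset.append(db[i][2])
--                         itemset.append(db[i+1][2])
--                     else:
--                         itemset.append(db[i+1][2])
--                 else: # same sequence
--                     if not itemset :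
--                         itemset.append(db[i][2])
--                     sequence.append(itemset)
--                     itemset = []
--             else:
--                 if not itemset :
--                     itemset.append(db[i][2])
--                 sequence.append(itemset)
--                 itemset = []
--                 sequence_done.append(sequence)
--                 sequence = []
--
--         except IndexError:
--             if not itemset :
--                 itemset.append(db[i][2])
--             sequence.append(itemset)
--             itemset = []
--             sequence_done.append(sequence)
--             sequence = []
--         i += 1
--
--     return sequence_done
-- ===== SOURCE B (Python) =====
-- from itertools import groupby
--
-- def make_sequence(db):
--     return [
--         [[row[2] for row in itemset_rows]
--          for _, itemset_rows in groupby(seq_rows, key=lambda r: r[1])]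
--         for _, seq_rows in groupby(db, key=lambda r: r[0])
--     ]
-- ===== Notes on version B (the rewrite author's own statement) =====
-- stated objective: idiomatic
-- what changed: Replaced A's indexed lookahead state machine (db[i]/db[i+1] comparisons, try/except IndexError terminator, 'if not itemset' lazy seeding of three mutable accumulators) with nested itertools.groupby: consecutive grouping by sequence id, then by itemset id, collecting the items of each run.
import Mathlib
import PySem

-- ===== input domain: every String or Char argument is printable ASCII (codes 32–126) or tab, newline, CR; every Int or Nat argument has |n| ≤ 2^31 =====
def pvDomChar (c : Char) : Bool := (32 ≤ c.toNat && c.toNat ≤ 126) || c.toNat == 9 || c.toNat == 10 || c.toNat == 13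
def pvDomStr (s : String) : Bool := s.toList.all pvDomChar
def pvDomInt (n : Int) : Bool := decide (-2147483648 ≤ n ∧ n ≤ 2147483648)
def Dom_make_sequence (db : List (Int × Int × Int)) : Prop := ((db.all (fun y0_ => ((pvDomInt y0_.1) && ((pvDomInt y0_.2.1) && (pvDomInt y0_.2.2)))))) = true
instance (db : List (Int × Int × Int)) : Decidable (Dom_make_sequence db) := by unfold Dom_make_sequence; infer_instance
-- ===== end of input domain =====

-- B replaces A's indexed lookahead state machine (try/except + 'if not itemset' seeding)
-- with a nested consecutive-grouping decomposition (itertools.groupby); objective: idiomatic.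

-- ===== PORT A =====
-- A's loop with lookahead db[i+1]: the structural recursion matches on the current row and
-- the next row; the single-row case is the IndexError / except branch of the Python.
def make_sequence_go (done : List (List (List Int))) (seq : List (List Int))
    (itemset : List Int) : List (Int × Int × Int) → List (List (List Int))
  | [] => done
  | [x] =>
      -- except IndexError branch (db[i+1] out of range at the last row)
      done ++ [seq ++ [if itemset = [] then [x.2.2] else itemset]]
  | x :: y :: rest =>
      if x.1 = y.1 then
        if x.2.1 = y.2.1 then
          make_sequence_go done seq
            (if itemset = [] then [x.2.2, y.2.2] else itemset ++ [y.2.2]) (y :: rest)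
        else
          make_sequence_go done (seq ++ [if itemset = [] then [x.2.2] else itemset]) []
            (y :: rest)
      else
        make_sequence_go (done ++ [seq ++ [if itemset = [] then [x.2.2] else itemset]]) [] []
          (y :: rest)

def make_sequence (db : List (Int × Int × Int)) : List (List (List Int)) :=
  make_sequence_go [] [] [] db

-- ===== PORT B =====
-- hand port of itertools.groupby (consecutive rows with equal key form one group)
def groupRuns {α : Type} (key : α → Int) : List α → List (List α)
  | [] => []
  | [x] => [[x]]
  | x :: y :: rest =>
      match groupRuns key (y :: rest) with
      | [] => [[x]]
      | g :: gs => if key x = key y then (x :: g) :: gs else [x] :: g :: gs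

def make_sequence_alt (db : List (Int × Int × Int)) : List (List (List Int)) :=
  (groupRuns (fun r => r.1) db).map
    (fun seqRows => (groupRuns (fun r => r.2.1) seqRows).map (List.map (fun r => r.2.2)))

-- ===== PRECONDITION & SPEC =====
def Spec_make_sequence (db : List (Int × Int × Int)) (out : List (List (List Int))) : Prop := out = make_sequence_alt db
instance (db : List (Int × Int × Int)) (out : List (List (List Int))) : Decidable (Spec_make_sequence db out) := by unfold Spec_make_sequence; infer_instance

-- ===== CLAIM (what is proved, stated in full; the proofs are below) =====
def Claim_equal_make_sequence : Prop := ∀ (db : List (Int × Int × Int)), Dom_make_sequence db → Spec_make_sequence db (make_sequence db)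

-- ===== LEMMAS AND PROOFS =====

-- groupRuns in takeWhile/dropWhile form (key equality is transitive, so a run of
-- adjacent-equal keys is exactly the rows whose key equals the head's).
theorem groupRuns_cons {α : Type} (key : α → Int) (a : α) (l : List α) :
    groupRuns key (a :: l)
      = (a :: l.takeWhile (fun b => key b == key a))
          :: groupRuns key (l.dropWhile (fun b => key b == key a)) := by
  induction l generalizing a with
  | nil => simp [groupRuns]
  | cons y rest ih =>
    by_cases h : key a = key y
    · have hp : (fun b => key b == key a) = (fun b => key b == key y) := by
        funext b; rw [h]
      simp only [groupRuns, ih y, List.takeWhile, List.dropWhile, hp]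
      simp [h]
    · simp only [groupRuns, ih y, List.takeWhile, List.dropWhile]
      have : (key y == key a) = false := by
        simp only [beq_eq_false_iff_ne, ne_eq]; exact fun hh => h hh.symm
      simp [this, h, ih y]

-- the itemsets of one sequence, with the items accumulated so far for the first
-- (in-progress) itemset; empty accumulator means "start fresh from the head row"
def innerF (its : List Int) : List (Int × Int × Int) → List (List Int)
  | [] => []
  | x :: s =>
      ((if its = [] then [x.2.2] else its)
          ++ (s.takeWhile (fun b => b.2.1 == x.2.1)).map (fun r => r.2.2))
        :: (groupRuns (fun r => r.2.1) (s.dropWhile (fun b => b.2.1 == x.2.1))).map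
            (List.map (fun r => r.2.2))

theorem innerF_nil (s : List (Int × Int × Int)) :
    innerF [] s = (groupRuns (fun r => r.2.1) s).map (List.map (fun r => r.2.2)) := by
  cases s with
  | nil => simp [innerF, groupRuns]
  | cons x t => rw [groupRuns_cons]; simp [innerF]

theorem make_sequence_go_eq (l : List (Int × Int × Int)) (x : Int × Int × Int)
    (done : List (List (List Int))) (seq : List (List Int)) (its : List Int) :
    make_sequence_go done seq its (x :: l)
      = done ++ (seq ++ innerF its (x :: l.takeWhile (fun b => b.1 == x.1)))
          :: (groupRuns (fun r => r.1) (l.dropWhile (fun b => b.1 == x.1))).map (innerF []) := by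
  induction l generalizing x done seq its with
  | nil =>
    simp [make_sequence_go, innerF, groupRuns]
  | cons y rest ih =>
    by_cases hs : x.1 = y.1
    · have hps : (fun b : Int × Int × Int => b.1 == x.1) = (fun b => b.1 == y.1) := by
        funext b; rw [hs]
      by_cases ht : x.2.1 = y.2.1
      · have hpt : (fun b : Int × Int × Int => b.2.1 == x.2.1) = (fun b => b.2.1 == y.2.1) := by
          funext b; rw [ht]
        simp only [make_sequence_go, hs, ht, if_true]
        rw [ih]
        simp only [List.takeWhile_cons, List.dropWhile_cons, beq_self_eq_true,
          if_true, innerF]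
        split <;> simp [ht]
      · simp only [make_sequence_go, hs, ht, if_true, ite_false]
        rw [ih]
        have hyt : (y.2.1 == x.2.1) = false := by
          simp only [beq_eq_false_iff_ne, ne_eq]; exact fun hh => ht hh.symm
        simp only [List.takeWhile_cons, List.dropWhile_cons, beq_self_eq_true, if_true, innerF,
          hyt, Bool.false_eq_true, ite_false, List.append_assoc, List.cons_append]
        rw [groupRuns_cons (fun r => r.2.1) y]
        simp
    · have hys : (y.1 == x.1) = false := by
        simp only [beq_eq_false_iff_ne, ne_eq]; exact fun hh => hs hh.symm
      simp only [make_sequence_go, hs, ite_false]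
      rw [ih]
      simp only [List.takeWhile_cons, List.dropWhile_cons, hys, Bool.false_eq_true, ite_false,
        innerF, List.append_assoc, List.cons_append]
      rw [groupRuns_cons (fun r => r.1) y]
      simp [innerF, groupRuns]

-- ===== VERDICT (by name: the statement is the Claim_ definition above) =====
theorem make_sequence_spec : Claim_equal_make_sequence := by
  intro db _
  unfold Spec_make_sequence make_sequence make_sequence_alt
  cases db with
  | nil => simp [make_sequence_go, groupRuns]
  | cons x l =>
    rw [make_sequence_go_eq, groupRuns_cons]
    simp [innerF_nil]
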